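-- pv_equiv track=rewrite | github.com/JanBellingrath/inference-time-program-selection-for-transformer-models | training/train_joint_router.py | intersection_explored_sequences
-- ===== SOURCE A (Python) =====
-- from typing import Any, Dict, List, Optional, Set, Tuple, Union
--
-- def explored_sequences_union(
--     per_bench_records: Dict[str, List[Dict]],
--     bench: str,
-- ) -> Set[tuple]:
--     """All distinct ``explored`` layer sequences for one benchmark."""
--     out: Set[tuple] = set()
--     for rec in per_bench_records.get(bench, []):
--         for ex in rec.get("explored", []):
--             out.add(tuple(int(x) for x in ex["seq"]))
--     return out
--
-- def intersection_explored_sequences(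
--     per_bench_records: Dict[str, List[Dict]],
--     bench_names: List[str],
-- ) -> Set[tuple]:
--     """⋂_b { sequences appearing in MCTS ``explored`` for benchmark *b* }."""
--     if not bench_names:
--         return set()
--     sets = [explored_sequences_union(per_bench_records, b) for b in bench_names]
--     inter = set.intersection(*sets) if sets else set()
--     return inter
-- ===== SOURCE B (Python) =====
-- def intersection_explored_sequences(per_bench_records, bench_names):
--     """Prebuilt index + count-and-threshold: one dict comprehension maps each
--     needed benchmark to its distinct sequences; a counter over bench_names
--     keeps the sequences seen len(bench_names) times."""
--     need = set(bench_names)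
--     index = {name: {tuple(int(x) for x in ex["seq"])
--                     for rec in recs for ex in rec.get("explored", [])}
--              for name, recs in per_bench_records.items() if name in need}
--     counts = {}
--     for b in bench_names:
--         for t in index.get(b, set()):
--             counts[t] = counts.get(t, 0) + 1
--     k = len(bench_names)
--     return {t for t, c in counts.items() if c == k}
-- ===== Notes on version B (the rewrite author's own statement) =====
-- stated objective: alternative
-- what changed: B replaces A's build-one-set-per-benchmark + set.intersection(*sets) by a single dict-comprehension index over per_bench_records.items() (restricted to the needed names) followed by a count-and-threshold pass: sequences counted len(bench_names) times are returned; the empty-bench_names guard disappears because the threshold handles it.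
import Mathlib
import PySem

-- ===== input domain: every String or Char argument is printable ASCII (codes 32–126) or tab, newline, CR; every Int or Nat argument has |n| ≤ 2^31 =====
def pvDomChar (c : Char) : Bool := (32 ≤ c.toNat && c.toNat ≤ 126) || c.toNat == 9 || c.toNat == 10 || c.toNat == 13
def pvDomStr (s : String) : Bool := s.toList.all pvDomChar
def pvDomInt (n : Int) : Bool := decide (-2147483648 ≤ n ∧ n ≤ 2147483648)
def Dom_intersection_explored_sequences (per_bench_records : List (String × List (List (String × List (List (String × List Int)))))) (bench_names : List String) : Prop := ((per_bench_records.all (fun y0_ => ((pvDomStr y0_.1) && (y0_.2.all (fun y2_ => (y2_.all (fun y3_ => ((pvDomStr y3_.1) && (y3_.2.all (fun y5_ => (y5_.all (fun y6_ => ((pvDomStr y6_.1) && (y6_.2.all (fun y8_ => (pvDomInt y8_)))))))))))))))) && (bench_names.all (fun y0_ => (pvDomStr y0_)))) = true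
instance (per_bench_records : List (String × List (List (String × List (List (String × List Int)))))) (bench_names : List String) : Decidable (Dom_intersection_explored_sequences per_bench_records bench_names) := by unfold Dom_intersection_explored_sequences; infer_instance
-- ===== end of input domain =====

-- B replaces A's per-benchmark set building + set.intersection(*sets) by a one-pass
-- prebuilt index over the needed benchmarks plus a count-and-threshold counter
-- (objective: alternative decomposition; equivalence of RETURN values is proved).

-- ===== PORT A =====
-- helper explored_sequences_union: the distinct explored sequences of one benchmark
def explored_sequences_union (per_bench_records : List (String × List (List (String × List (List (String × List Int)))))) (bench : String) : PySem.Set (List Int) :=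
  ((PySem.Dict.mk per_bench_records).getD bench []).foldl
    (fun out rec =>
      ((PySem.Dict.mk rec).getD "explored" []).foldl
        (fun out ex => PySem.Set.add out ((PySem.Dict.mk ex).getD "seq" []))  -- ex["seq"]; Pre_ guarantees the key is present
        out)
    PySem.Set.empty

def intersection_explored_sequences (per_bench_records : List (String × List (List (String × List (List (String × List Int)))))) (bench_names : List String) : List (List Int) :=
  if bench_names.isEmpty then [] else
    let sets := bench_names.map (fun b => explored_sequences_union per_bench_records b)
    match sets with
    | [] => []                                    -- 'if sets else set()' branch
    | s :: rest => rest.foldl PySem.Set.inter s   -- set.intersection(*sets)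

-- ===== PORT B =====
-- helper: the dict comprehension 'index' of Source B — each needed benchmark mapped, in one
-- pass over per_bench_records.items(), to its set of distinct explored sequences
def pvSeqIndex (per_bench_records : List (String × List (List (String × List (List (String × List Int)))))) (bench_names : List String) : PySem.Dict String (PySem.Set (List Int)) :=
  PySem.Dict.mk
    (((PySem.Dict.mk per_bench_records).items.filter
        (fun p => PySem.Set.contains (PySem.Set.ofList bench_names) p.1))  -- 'if name in need'
      |>.map (fun p =>
        (p.1, PySem.Set.ofList (p.2.flatMap (fun rec =>
          ((PySem.Dict.mk rec).getD "explored" []).map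
            (fun ex => (PySem.Dict.mk ex).getD "seq" []))))))  -- ex["seq"]; Pre_ guarantees the key is present

def intersection_explored_sequences_alt (per_bench_records : List (String × List (List (String × List (List (String × List Int)))))) (bench_names : List String) : List (List Int) :=
  let index := pvSeqIndex per_bench_records bench_names
  let counts : PySem.Dict (List Int) Int :=
    bench_names.foldl
      (fun counts b =>
        (index.getD b PySem.Set.empty).foldl
          (fun counts t => counts.modify t 0 (· + 1))   -- counts[t] = counts.get(t, 0) + 1
          counts)
      PySem.Dict.empty
  let k : Int := bench_names.length
  PySem.Set.ofList ((counts.items.filter (fun p => p.2 == k)).map (fun p => p.1))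

-- ===== PRECONDITION & SPEC =====
-- Pre_ excludes exactly the inputs where Python A raises KeyError: some explored
-- entry of a benchmark listed in bench_names lacks the "seq" key.
def Pre_intersection_explored_sequences (per_bench_records : List (String × List (List (String × List (List (String × List Int)))))) (bench_names : List String) : Prop :=
  ∀ b ∈ bench_names, ∀ rec ∈ (PySem.Dict.mk per_bench_records).getD b [],
    ∀ ex ∈ (PySem.Dict.mk rec).getD "explored" [], (PySem.Dict.mk ex).contains "seq" = true
instance (per_bench_records : List (String × List (List (String × List (List (String × List Int)))))) (bench_names : List String) : Decidable (Pre_intersection_explored_sequences per_bench_records bench_names) := by unfold Pre_intersection_explored_sequences; infer_instance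

def pvWitness_intersection_explored_sequences : (List (String × List (List (String × List (List (String × List Int)))))) × List String :=
  ([("a", [[("explored", [[("seq", [1, 2])], [("seq", [3])]])]]), ("b", [[("explored", [[("seq", [1, 2])]])]])], ["a", "b"])

def Spec_intersection_explored_sequences (per_bench_records : List (String × List (List (String × List (List (String × List Int)))))) (bench_names : List String) (out : List (List Int)) : Prop := out = intersection_explored_sequences_alt per_bench_records bench_names
instance (per_bench_records : List (String × List (List (String × List (List (String × List Int)))))) (bench_names : List String) (out : List (List Int)) : Decidable (Spec_intersection_explored_sequences per_bench_records bench_names out) := by unfold Spec_intersection_explored_sequences; infer_instance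

-- ===== CLAIM (what is proved, stated in full; the proofs are below) =====
def Claim_equal_intersection_explored_sequences : Prop := ∀ (per_bench_records : List (String × List (List (String × List (List (String × List Int)))))) (bench_names : List String), Dom_intersection_explored_sequences per_bench_records bench_names → Pre_intersection_explored_sequences per_bench_records bench_names → Spec_intersection_explored_sequences per_bench_records bench_names (intersection_explored_sequences per_bench_records bench_names)

-- ===== LEMMAS AND PROOFS =====

-- proof-only: the sequences of one benchmark, in encounter order (with repetitions)
def pvBenchSeqs (per_bench_records : List (String × List (List (String × List (List (String × List Int)))))) (b : String) : List (List Int) :=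
  ((PySem.Dict.mk per_bench_records).getD b []).flatMap
    (fun rec => ((PySem.Dict.mk rec).getD "explored" []).map
      (fun ex => (PySem.Dict.mk ex).getD "seq" []))

theorem union_eq_ofList_benchSeqs (pbr : List (String × List (List (String × List (List (String × List Int)))))) (b : String) :
    explored_sequences_union pbr b = PySem.Set.ofList (pvBenchSeqs pbr b) := by
  simp only [explored_sequences_union, pvBenchSeqs, PySem.Set.ofList_eq_foldl,
    List.foldl_flatMap, List.foldl_map, PySem.Set.empty]

-- the dict comprehension looked up at a key satisfying the filter = the mapped value
theorem get?_mk_filter_map {ν ν' : Type} (l : List (String × ν)) (q : String → Bool)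
    (f : ν → ν') (b : String) (hb : q b = true) :
    (PySem.Dict.mk ((l.filter (fun p => q p.1)).map (fun p => (p.1, f p.2)))).get? b
      = ((PySem.Dict.mk l).get? b).map f := by
  induction l with
  | nil => rfl
  | cons p l ih =>
      obtain ⟨k, v⟩ := p
      by_cases hq : q k
      · simp only [List.filter_cons, hq, if_true, List.map_cons, PySem.Dict.get?_mk_cons]
        by_cases he : k == b <;> simp [he, ih]
      · have hne : (k == b) = false := by
          cases h : k == b with
          | false => rfl
          | true => exact absurd (by rwa [eq_of_beq h]) hq
        simp only [List.filter_cons, hq, if_false, PySem.Dict.get?_mk_cons, hne, ih,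
          Bool.false_eq_true]

theorem index_getD (pbr : List (String × List (List (String × List (List (String × List Int)))))) (bns : List String) (b : String) (hb : b ∈ bns) :
    (pvSeqIndex pbr bns).getD b PySem.Set.empty = PySem.Set.ofList (pvBenchSeqs pbr b) := by
  have hq : PySem.Set.contains (PySem.Set.ofList bns) b = true := by
    simp [PySem.Set.mem_ofList, hb]
  unfold pvSeqIndex
  rw [PySem.Dict.getD_eq_get?_getD,
    get?_mk_filter_map ((PySem.Dict.mk pbr).items)
      (fun s => PySem.Set.contains (PySem.Set.ofList bns) s)
      (fun recs => PySem.Set.ofList (recs.flatMap (fun rec =>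
        ((PySem.Dict.mk rec).getD "explored" []).map
          (fun ex => (PySem.Dict.mk ex).getD "seq" [])))) b hq]
  cases h : (PySem.Dict.mk pbr).get? b with
  | none => simp [pvBenchSeqs, PySem.Dict.getD_eq_get?_getD, h, PySem.Set.empty]
  | some v => simp [pvBenchSeqs, PySem.Dict.getD_eq_get?_getD, h]

theorem foldl_congr' {α β : Type} (l : List β) (f g : α → β → α) (a : α)
    (h : ∀ x ∈ l, ∀ acc, f acc x = g acc x) : l.foldl f a = l.foldl g a := by
  induction l generalizing a with
  | nil => rfl
  | cons x l ih => rw [List.foldl_cons, List.foldl_cons, h x (by simp)]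
                   exact ih _ (fun y hy acc => h y (by simp [hy]) acc)

theorem counts_eq_counter (pbr : List (String × List (List (String × List (List (String × List Int)))))) (bns : List String) :
    bns.foldl
      (fun counts b =>
        ((pvSeqIndex pbr bns).getD b PySem.Set.empty).foldl
          (fun counts t => counts.modify t 0 (· + 1)) counts)
      PySem.Dict.empty
    = PySem.Dict.counter (bns.flatMap (fun b => PySem.Set.ofList (pvBenchSeqs pbr b))) := by
  rw [PySem.Dict.counter_eq_foldl, List.foldl_flatMap]
  exact foldl_congr' _ _ _ _ (fun b hb acc => by rw [index_getD pbr bns b hb])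

theorem foldl_inter_eq_filter {α : Type} [BEq α] (ts : List (PySem.Set α)) (s : PySem.Set α) :
    ts.foldl PySem.Set.inter s = s.filter (fun t => ts.all (fun u => PySem.Set.contains u t)) := by
  induction ts generalizing s with
  | nil => simp
  | cons u ts ih =>
      rw [List.foldl_cons, ih]
      show (PySem.Set.inter s u).filter _ = _
      rw [show PySem.Set.inter s u = s.filter (fun x => PySem.Set.contains u x) from rfl,
        List.filter_filter]
      simp [Bool.and_comm]

theorem foldl_add_append {α : Type} [BEq α] [LawfulBEq α] (l : List α) (s : PySem.Set α) :
    ∃ r, l.foldl PySem.Set.add s = s ++ r ∧ ∀ x ∈ r, x ∉ s := by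
  induction l generalizing s with
  | nil => exact ⟨[], by simp⟩
  | cons x l ih =>
      rw [List.foldl_cons]
      by_cases hx : x ∈ s
      · have : PySem.Set.add s x = s := by simp [PySem.Set.add, hx]
        rw [this]; exact ih s
      · have hadd : PySem.Set.add s x = s ++ [x] := by simp [PySem.Set.add, hx]
        obtain ⟨r, hr, hnr⟩ := ih (s ++ [x])
        refine ⟨x :: r, by simpa [hadd] using hr, ?_⟩
        intro y hy hys
        rcases hy with _ | hy
        · exact hx (by assumption)
        · exact hnr y (by assumption) (by simp [hys])

theorem count_flat (pbr : List (String × List (List (String × List (List (String × List Int)))))) (bns : List String) (t : List Int) :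
    (bns.flatMap (fun b => PySem.Set.ofList (pvBenchSeqs pbr b))).count t
      = bns.countP (fun b => PySem.Set.ofList (pvBenchSeqs pbr b) |>.contains t) := by
  rw [List.count, List.countP_flatMap,
    ← PySem.List.sum_map_ite_one_zero_nat (fun b => PySem.Set.ofList (pvBenchSeqs pbr b) |>.contains t) bns]
  congr 1
  apply List.map_congr_left
  intro b _
  simp only [Function.comp, PySem.Set.contains_eq_listContains]
  by_cases hm : t ∈ PySem.Set.ofList (pvBenchSeqs pbr b)
  · rw [if_pos (List.contains_iff_mem.mpr hm), ← List.count]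
    exact List.count_eq_one_of_mem (PySem.Set.nodup_ofList _) hm
  · rw [if_neg (fun h => hm (List.contains_iff_mem.mp h)), ← List.count]
    exact List.count_eq_zero_of_not_mem hm

theorem ports_agree (pbr : List (String × List (List (String × List (List (String × List Int)))))) (bns : List String) :
    intersection_explored_sequences pbr bns = intersection_explored_sequences_alt pbr bns := by
  cases bns with
  | nil => rfl
  | cons b₁ rest =>
    have hnodup : ∀ b : String, (PySem.Set.ofList (pvBenchSeqs pbr b) : List (List Int)).Nodup :=
      fun b => PySem.Set.nodup_ofList _
    have hA : intersection_explored_sequences pbr (b₁ :: rest)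
        = (PySem.Set.ofList (pvBenchSeqs pbr b₁)).filter
            (fun t => rest.all (fun b => (PySem.Set.ofList (pvBenchSeqs pbr b)).contains t)) := by
      simp only [intersection_explored_sequences, List.isEmpty_cons, Bool.false_eq_true,
        if_false, List.map_cons]
      rw [foldl_inter_eq_filter, union_eq_ofList_benchSeqs]
      apply List.filter_congr
      intro t _
      rw [List.all_map]
      simp only [union_eq_ofList_benchSeqs]
      rfl
    have hB : intersection_explored_sequences_alt pbr (b₁ :: rest)
        = PySem.Set.ofList
            ((PySem.Set.ofList ((b₁ :: rest).flatMap (fun b => PySem.Set.ofList (pvBenchSeqs pbr b)))).filter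
              (fun t => ((((b₁ :: rest).flatMap (fun b => PySem.Set.ofList (pvBenchSeqs pbr b))).count t : Int)
                  == ((b₁ :: rest).length : Int)))) := by
      simp only [intersection_explored_sequences_alt]
      rw [counts_eq_counter, PySem.Dict.items_counter, List.filter_map, List.map_map]
      simp only [Function.comp_def, List.map_id']
    rw [hA, hB]
    rw [PySem.Set.ofList_eq_self_of_nodup _ ((PySem.Set.nodup_ofList _).filter _)]
    have hsplit : ∃ r, PySem.Set.ofList ((b₁ :: rest).flatMap (fun b => PySem.Set.ofList (pvBenchSeqs pbr b)))
        = PySem.Set.ofList (pvBenchSeqs pbr b₁) ++ r ∧ ∀ x ∈ r, x ∉ PySem.Set.ofList (pvBenchSeqs pbr b₁) := by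
      rw [List.flatMap_cons, PySem.Set.ofList_append,
        PySem.Set.ofList_eq_self_of_nodup _ (hnodup b₁), PySem.Set.update_eq_foldl]
      exact foldl_add_append _ _
    obtain ⟨r, hr, hfresh⟩ := hsplit
    rw [hr, List.filter_append]
    have hcount := count_flat pbr (b₁ :: rest)
    have hrnil : r.filter
        (fun t => ((((b₁ :: rest).flatMap (fun b => PySem.Set.ofList (pvBenchSeqs pbr b))).count t : Int)
            == ((b₁ :: rest).length : Int))) = [] := by
      rw [List.filter_eq_nil_iff]
      intro t ht
      simp only [beq_iff_eq, Nat.cast_inj, hcount t]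
      intro hEq
      have hall := List.countP_eq_length.mp hEq
      have : t ∈ PySem.Set.ofList (pvBenchSeqs pbr b₁) :=
        List.contains_iff_mem.mp (hall b₁ (by simp))
      exact hfresh t ht this
    rw [hrnil, List.append_nil]
    apply List.filter_congr
    intro t ht
    have hmem : (PySem.Set.ofList (pvBenchSeqs pbr b₁)).contains t = true :=
      List.contains_iff_mem.mpr ht
    rw [Bool.eq_iff_iff]
    simp only [List.all_eq_true, beq_iff_eq, Nat.cast_inj, hcount t, List.countP_cons, hmem,
      if_true, List.length_cons]
    constructor
    · intro h
      rw [List.countP_eq_length.mpr h]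
    · intro h
      have hle := List.countP_le_length
        (p := fun b => (PySem.Set.ofList (pvBenchSeqs pbr b)).contains t) (l := rest)
      exact List.countP_eq_length.mp (by omega)

-- ===== VERDICT (by name: the statement is the Claim_ definition above) =====
theorem intersection_explored_sequences_spec : Claim_equal_intersection_explored_sequences := by
  intro pbr bns _dom _pre
  exact ports_agree pbr bns
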